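-- pv_equiv track=rewrite | github.com/Becorder-Jayden/Studied_code | 프로그래머스/lv2/12951. JadenCase 문자열 만들기/JadenCase 문자열 만들기.py | solution
-- ===== SOURCE A (Python) =====
-- def solution(s):
--     s = s.lower()
--     ans = ''
--
--     for i in range(len(s)):
--         if i == 0:
--             ans += s[i].upper()
--         elif s[i-1] == ' ':
--             ans += s[i].upper()
--         else:
--             ans += s[i]
--     return ans
-- ===== SOURCE B (Python) =====
-- def solution(s):
--     return ' '.join(w[:1].upper() + w[1:] for w in s.lower().split(' '))
-- ===== Notes on version B (the rewrite author's own statement) =====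
-- stated objective: idiomatic
-- what changed: Replaces the index loop with its look-behind at s[i-1] (and quadratic ans += c string building) by split-on-space / capitalize-each-token / join, with w[:1].upper()+w[1:] so empty tokens and runs of spaces round-trip exactly.
import Mathlib
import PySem

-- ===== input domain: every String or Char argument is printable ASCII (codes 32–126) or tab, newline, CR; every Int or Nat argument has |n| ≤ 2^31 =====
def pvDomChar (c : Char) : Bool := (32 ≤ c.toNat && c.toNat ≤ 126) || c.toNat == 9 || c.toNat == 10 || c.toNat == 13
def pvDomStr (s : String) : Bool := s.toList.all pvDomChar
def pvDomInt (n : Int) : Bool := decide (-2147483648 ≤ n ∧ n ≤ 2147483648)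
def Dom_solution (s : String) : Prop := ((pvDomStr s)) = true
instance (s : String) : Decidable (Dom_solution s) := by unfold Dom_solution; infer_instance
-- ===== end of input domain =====

-- B replaces A's index loop (look-behind at s[i-1]) by split-on-' '/capitalize-token/join; proved equal on all of Dom.


-- ===== PORT A =====
-- literal port of A: s = s.lower(); then for i in range(len(s)) append the
-- (possibly uppercased) i-th character to ans.  The index i (and i-1 when i ≠ 0)
-- is always in range, so getD's default ' ' is never used.
def solution (s : String) : String :=
  let t := PySem.Chars.lower s.toList
  let ans := (List.range t.length).foldl
    (fun ans i =>
      if i = 0 then ans ++ [PySem.Chars.upperChar (t.getD i ' ')]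
      else if t.getD (i - 1) ' ' = ' ' then ans ++ [PySem.Chars.upperChar (t.getD i ' ')]
      else ans ++ [t.getD i ' '])
    []
  String.ofList ans

-- ===== PORT B =====
-- literal port of B: ' '.join(w[:1].upper() + w[1:] for w in s.lower().split(' '))
def solution_alt (s : String) : String :=
  let words := PySem.Chars.splitOn (PySem.Chars.lower s.toList) [' ']
  String.ofList (PySem.Chars.join [' ']
    (words.map (fun w =>
      PySem.Chars.upper (PySem.List.slice w none (some 1)) ++ PySem.List.slice w (some 1) none)))

-- ===== PRECONDITION & SPEC =====
def Spec_solution (s : String) (out : String) : Prop := out = solution_alt s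
instance (s : String) (out : String) : Decidable (Spec_solution s out) := by unfold Spec_solution; infer_instance

-- ===== CLAIM (what is proved, stated in full; the proofs are below) =====
def Claim_equal_solution : Prop := ∀ (s : String), Dom_solution s → Spec_solution s (solution s)

-- ===== LEMMAS AND PROOFS =====

/-- Reference capitalizer: `capB flag l` uppercases a character iff the previous
character was a space (`flag` says whether the previous position counts as a space,
true at the start of the string). -/
def capB : Bool → List Char → List Char
  | _, [] => []
  | flag, c :: r => (if flag then PySem.Chars.upperChar c else c) :: capB (c == ' ') r

/-- Reference split on a single space, keeping empty pieces. -/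
def spl : List Char → List (List Char)
  | [] => [[]]
  | c :: r => if c = ' ' then [] :: spl r
              else match spl r with
                   | [] => [[c]]
                   | w :: ws => (c :: w) :: ws

theorem spl_ne_nil (l : List Char) : spl l ≠ [] := by
  cases l with
  | nil => simp [spl]
  | cons c r =>
    simp only [spl]
    split
    · simp
    · cases h : spl r <;> simp

/-- The fuel loop of `PySem.Chars.splitOn` with sep = [' '] computes `spl`. -/
theorem go_spl (l : List Char) : ∀ (fuel : Nat) (cur : List Char) (acc : List (List Char)),
    l.length < fuel →
    PySem.Chars.splitOn.go [' '] fuel l cur acc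
      = acc.reverse ++ (spl l).modifyHead (cur.reverse ++ ·) := by
  induction l with
  | nil =>
    intro fuel cur acc h
    cases fuel with
    | zero => omega
    | succ fuel => rw [PySem.Chars.splitOn.go.eq_def]; simp [spl]
  | cons c rest ih =>
    intro fuel cur acc h
    cases fuel with
    | zero => omega
    | succ fuel =>
      rw [PySem.Chars.splitOn.go.eq_def]
      simp only []
      by_cases hc : c = ' '
      · have hpre : List.isPrefixOf [' '] (c :: rest) = true := by
          simp [List.isPrefixOf, hc]
        rw [if_pos hpre]
        simp only [List.length_cons, List.length_nil, Nat.zero_add, List.drop_succ_cons,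
          List.drop_zero]
        rw [ih fuel [] (cur.reverse :: acc) (by simp at h; omega)]
        simp [spl, hc, List.modifyHead]
        cases hs : spl rest <;> simp
      · have hpre : List.isPrefixOf [' '] (c :: rest) = false := by
          simp [List.isPrefixOf]
          exact fun hb => hc hb.symm
        rw [if_neg (by simp [hpre])]
        rw [ih fuel (c :: cur) acc (by simp at h; omega)]
        simp only [spl, if_neg hc]
        rcases hs : spl rest with _ | ⟨w, ws⟩
        · exact absurd hs (spl_ne_nil rest)
        · simp [List.modifyHead]

theorem splitOn_eq_spl (l : List Char) : PySem.Chars.splitOn l [' '] = spl l := by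
  unfold PySem.Chars.splitOn
  rw [go_spl l (l.length + 1) [] [] (Nat.lt_succ_self _)]
  simp
  cases h : spl l with
  | nil => exact absurd h (spl_ne_nil l)
  | cons w ws => simp [List.modifyHead]

/-- B's per-token capitalizer in closed form. -/
def cap (w : List Char) : List Char :=
  PySem.Chars.upper (PySem.List.slice w none (some 1)) ++ PySem.List.slice w (some 1) none

theorem cap_nil : cap [] = [] := by decide

theorem cap_cons (c : Char) (r : List Char) : cap (c :: r) = PySem.Chars.upperChar c :: r := by
  unfold cap
  rw [PySem.List.slice_to _ (by norm_num), PySem.List.slice_from _ (by norm_num)]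
  simp [PySem.Chars.upper]

-- join [' '] unfolding helpers
theorem join_nil_cons (v : List Char) (ws : List (List Char)) :
    PySem.Chars.join [' '] ([] :: v :: ws) = ' ' :: PySem.Chars.join [' '] (v :: ws) := by
  simp [PySem.Chars.join, List.intercalate, List.intersperse]

theorem join_cons_head (a : Char) (w : List Char) (ws : List (List Char)) :
    PySem.Chars.join [' '] ((a :: w) :: ws) = a :: PySem.Chars.join [' '] (w :: ws) := by
  cases ws <;> simp [PySem.Chars.join, List.intercalate, List.intersperse]

/-- Core: joining the capitalized tokens of `spl r` is `capB` (in both modes). -/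
theorem join_cap_spl (r : List Char) :
    PySem.Chars.join [' '] ((spl r).map cap) = capB true r ∧
    (∀ h t', spl r = h :: t' →
      PySem.Chars.join [' '] (h :: t'.map cap) = capB false r) := by
  induction r with
  | nil =>
    constructor
    · simp [spl, cap_nil, capB]
    · intro h t' hs
      simp [spl] at hs
      simp [hs.1, hs.2, capB]
  | cons c rest ih =>
    rcases hs : spl rest with _ | ⟨h', t''⟩
    · exact absurd hs (spl_ne_nil rest)
    by_cases hc : c = ' '
    · have hstep : PySem.Chars.join [' '] (([] : List Char) :: (spl rest).map cap)
          = ' ' :: PySem.Chars.join [' '] ((spl rest).map cap) := by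
        rcases hm : (spl rest).map cap with _ | ⟨v, vs⟩
        · simp [hs] at hm
        · exact join_nil_cons v vs
      subst hc
      have hspl : spl (' ' :: rest) = [] :: spl rest := by simp [spl]
      constructor
      · rw [hspl, List.map_cons, cap_nil, hstep, ih.1]
        simp [capB, show PySem.Chars.upperChar ' ' = ' ' from by decide]
      · intro h t' hsp
        rw [hspl] at hsp
        injection hsp with h1 h2
        rw [← h1, ← h2, hstep, ih.1]
        simp [capB]
    · have hb : (c == ' ') = false := by simp [hc]
      have hsp : spl (c :: rest) = (c :: h') :: t'' := by
        simp [spl, if_neg hc, hs]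
      have ih2 := ih.2 h' t'' hs
      constructor
      · rw [hsp]
        simp only [List.map_cons, cap_cons, join_cons_head, ih2]
        simp [capB, hb]
      · intro h t' hsp'
        rw [hsp] at hsp'
        rw [← (List.cons.injEq _ _ _ _).mp hsp' |>.1,
            ← (List.cons.injEq _ _ _ _).mp hsp' |>.2]
        rw [join_cons_head, ih2]
        simp [capB, hb]

/-- A's shifted index body over `range r.length` equals `capB (c == ' ') r`. -/
theorem aux_shift (r : List Char) : ∀ (c : Char),
    (List.range r.length).map
      (fun i => if (c :: r).getD i ' ' = ' '
                then PySem.Chars.upperChar ((c :: r).getD (i + 1) ' ')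
                else (c :: r).getD (i + 1) ' ')
    = capB (c == ' ') r := by
  induction r with
  | nil => intro c; simp [capB]
  | cons d r' ih =>
    intro c
    rw [List.length_cons, List.range_succ_eq_map, List.map_cons, List.map_map]
    by_cases hc : c = ' ' <;>
      simp [capB, hc, Function.comp_def, ← ih d]

/-- A's indexed map over the whole range equals `capB true`. -/
theorem mapRange_capB (t : List Char) :
    (List.range t.length).map
      (fun i => if i = 0 then PySem.Chars.upperChar (t.getD i ' ')
                else if t.getD (i - 1) ' ' = ' ' then PySem.Chars.upperChar (t.getD i ' ')
                else t.getD i ' ')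
    = capB true t := by
  cases t with
  | nil => simp [capB]
  | cons c r =>
    rw [List.length_cons, List.range_succ_eq_map, List.map_cons, List.map_map]
    simp only [capB]
    refine List.cons_eq_cons.mpr ⟨by simp, ?_⟩
    rw [← aux_shift r c]
    apply List.map_congr_left
    intro i _
    simp

/-- A's foldl with per-branch appends is the map of its element body. -/
theorem foldl_body (t : List Char) (l : List Nat) (a : List Char) :
    l.foldl (fun ans i =>
      if i = 0 then ans ++ [PySem.Chars.upperChar (t.getD i ' ')]
      else if t.getD (i - 1) ' ' = ' ' then ans ++ [PySem.Chars.upperChar (t.getD i ' ')]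
      else ans ++ [t.getD i ' ']) a
    = a ++ l.map (fun i =>
        if i = 0 then PySem.Chars.upperChar (t.getD i ' ')
        else if t.getD (i - 1) ' ' = ' ' then PySem.Chars.upperChar (t.getD i ' ')
        else t.getD i ' ') := by
  induction l generalizing a with
  | nil => simp
  | cons i l ih =>
    simp only [List.foldl_cons, List.map_cons, ih]
    split_ifs <;> simp

-- ===== VERDICT (by name: the statement is the Claim_ definition above) =====
theorem solution_spec : Claim_equal_solution := by
  intro s _
  unfold Spec_solution solution solution_alt
  simp only [splitOn_eq_spl, foldl_body, List.nil_append, mapRange_capB]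
  exact congrArg String.ofList ((join_cap_spl (PySem.Chars.lower s.toList)).1).symm
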